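-- pv_equiv track=rewrite | github.com/pypi-data/pypi-mirror-403 | packages/kweaver-dolphin/kweaver_dolphin-0.2.1-py3-none-any.whl/dolphin/core/skill/skill_matcher.py | _split_namespaced_pattern_with_sorted_owners
-- ===== SOURCE A (Python) =====
-- from typing import Iterable, List, Optional, Set, Tuple, TYPE_CHECKING
--
-- def _split_namespaced_pattern_with_sorted_owners(
--     pattern: str, owner_names: Set[str], sorted_owners: List[str]
-- ) -> Tuple[Optional[str], str, bool]:
--     """Split pattern with pre-sorted owners (avoids repeated sorting)."""
--     if not owner_names:
--         return None, pattern, False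
--
--     if pattern in owner_names:
--         return pattern, "*", True
--
--     for owner in sorted_owners:
--         prefix = owner + "."
--         if pattern.startswith(prefix):
--             suffix = pattern[len(prefix):] or "*"
--             return owner, suffix, True
--
--     return None, pattern, False
-- ===== SOURCE B (Python) =====
-- from typing import List, Optional, Set, Tuple
--
--
-- def _split_namespaced_pattern_with_sorted_owners(
--     pattern: str, owner_names: Set[str], sorted_owners: List[str]
-- ) -> Tuple[Optional[str], str, bool]:
--     """Enumerate the pattern's dot positions and look each dotted prefix up in
--     a first-occurrence index of sorted_owners, keeping the match with the
--     smallest owner index (instead of testing every owner against the pattern)."""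
--     if not owner_names:
--         return None, pattern, False
--
--     if pattern in owner_names:
--         return pattern, "*", True
--
--     pos = {}
--     for i, owner in enumerate(sorted_owners):
--         if owner not in pos:
--             pos[owner] = i
--
--     best = None  # (owner index, dot position)
--     for i, ch in enumerate(pattern):
--         if ch == '.':
--             j = pos.get(pattern[:i])
--             if j is not None and (best is None or j < best[0]):
--                 best = (j, i)
--
--     if best is None:
--         return None, pattern, False
--     _, i = best
--     return pattern[:i], pattern[i + 1:] or "*", True
-- ===== Notes on version B (the rewrite author's own statement) =====
-- stated objective: alternative
-- what changed: A scans every owner and runs a startswith test per owner; B builds a first-occurrence index of sorted_owners once, then enumerates only the pattern's dot positions, looks each dotted prefix up in that index and keeps the hit with the smallest owner index.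
import Mathlib
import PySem

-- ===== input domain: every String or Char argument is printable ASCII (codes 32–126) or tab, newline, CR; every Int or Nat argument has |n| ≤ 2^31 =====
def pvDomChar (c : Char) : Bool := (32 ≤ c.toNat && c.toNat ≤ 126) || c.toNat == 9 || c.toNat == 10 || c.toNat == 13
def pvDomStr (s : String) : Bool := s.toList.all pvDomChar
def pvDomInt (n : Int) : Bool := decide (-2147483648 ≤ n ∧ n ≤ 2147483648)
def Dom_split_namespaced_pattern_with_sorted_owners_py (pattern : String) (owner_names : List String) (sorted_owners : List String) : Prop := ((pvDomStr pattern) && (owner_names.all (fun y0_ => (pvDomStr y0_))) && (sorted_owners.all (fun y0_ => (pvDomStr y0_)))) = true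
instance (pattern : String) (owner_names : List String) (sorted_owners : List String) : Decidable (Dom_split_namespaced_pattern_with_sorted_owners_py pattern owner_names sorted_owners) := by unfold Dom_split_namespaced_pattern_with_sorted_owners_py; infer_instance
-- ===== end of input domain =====

-- B replaces A's scan over all owners (a startswith test per owner) by enumerating the
-- pattern's dot positions and looking each dotted prefix up in a first-occurrence index
-- of sorted_owners, keeping the hit with the smallest owner index; objective: alternative.

-- ===== PORT A =====
-- the 'for owner in sorted_owners' loop of A
def aFindOwner (pattern : String) : List String → Option String × String × Bool
  | [] => (none, pattern, false)
  | owner :: rest =>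
    let pfx := owner ++ "."
    if PySem.Str.startswith pattern pfx then
      let suffix := PySem.Str.slice pattern (some ((PySem.Str.len pfx : Int))) none
      (some owner, if suffix = "" then "*" else suffix, true)
    else aFindOwner pattern rest

def split_namespaced_pattern_with_sorted_owners_py (pattern : String) (owner_names : List String) (sorted_owners : List String) : Option String × String × Bool :=
  if owner_names = [] then (none, pattern, false)
  else if pattern ∈ owner_names then (some pattern, "*", true)
  else aFindOwner pattern sorted_owners

-- ===== PORT B =====
-- 'for i, owner in enumerate(sorted_owners): if owner not in pos: pos[owner] = i'
def bBuildPos : List String → Nat → PySem.Dict String Nat → PySem.Dict String Nat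
  | [], _, pos => pos
  | owner :: rest, i, pos =>
      bBuildPos rest (i + 1) (if pos.contains owner then pos else pos.insert owner i)

-- 'for i, ch in enumerate(pattern): …' — pattern[:i] for 0 ≤ i < len is exactly take i
def bBestLoop (cs : List Char) (pos : PySem.Dict String Nat) :
    List Char → Nat → Option (Nat × Nat) → Option (Nat × Nat)
  | [], _, best => best
  | ch :: rest, i, best =>
      let best' :=
        if ch = '.' then
          match pos.get? (String.ofList (cs.take i)) with
          | some j =>
            match best with
            | none => some (j, i)
            | some b => if j < b.1 then some (j, i) else some b
          | none => best
        else best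
      bBestLoop cs pos rest (i + 1) best'

def split_namespaced_pattern_with_sorted_owners_py_alt (pattern : String) (owner_names : List String) (sorted_owners : List String) : Option String × String × Bool :=
  if owner_names = [] then (none, pattern, false)
  else if pattern ∈ owner_names then (some pattern, "*", true)
  else
    let pos := bBuildPos sorted_owners 0 PySem.Dict.empty
    let cs := pattern.toList
    match bBestLoop cs pos cs 0 none with
    | none => (none, pattern, false)
    | some b =>
        let suffix := String.ofList (cs.drop (b.2 + 1))  -- pattern[i+1:] with 0 ≤ i+1: exact
        (some (String.ofList (cs.take b.2)), if suffix = "" then "*" else suffix, true)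

-- ===== PRECONDITION & SPEC =====
def Spec_split_namespaced_pattern_with_sorted_owners_py (pattern : String) (owner_names : List String) (sorted_owners : List String) (out : Option String × String × Bool) : Prop := out = split_namespaced_pattern_with_sorted_owners_py_alt pattern owner_names sorted_owners
instance (pattern : String) (owner_names : List String) (sorted_owners : List String) (out : Option String × String × Bool) : Decidable (Spec_split_namespaced_pattern_with_sorted_owners_py pattern owner_names sorted_owners out) := by unfold Spec_split_namespaced_pattern_with_sorted_owners_py; infer_instance

-- ===== CLAIM (what is proved, stated in full; the proofs are below) =====
def Claim_equal_split_namespaced_pattern_with_sorted_owners_py : Prop := ∀ (pattern : String) (owner_names : List String) (sorted_owners : List String), Dom_split_namespaced_pattern_with_sorted_owners_py pattern owner_names sorted_owners → Spec_split_namespaced_pattern_with_sorted_owners_py pattern owner_names sorted_owners (split_namespaced_pattern_with_sorted_owners_py pattern owner_names sorted_owners)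

-- ===== LEMMAS AND PROOFS =====

-- the predicate A's loop tests
def aPred (pattern owner : String) : Bool := PySem.Str.startswith pattern (owner ++ ".")

theorem aPred_iff (pattern owner : String) :
    aPred pattern owner = true ↔ owner.toList ++ ['.'] <+: pattern.toList := by
  simp [aPred, PySem.Str.startswith, PySem.Chars.startswith_iff]

-- buildPos looks up as first-occurrence index
theorem bBuildPos_get? : ∀ (l : List String) (i : Nat) (d : PySem.Dict String Nat) (s : String),
    (bBuildPos l i d).get? s =
      ((d.get? s).orElse (fun _ => (PySem.List.index? l s).map (· + i))) := by
  intro l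
  induction l with
  | nil => intro i d s; cases h : d.get? s <;> simp [bBuildPos, PySem.List.index?, h]
  | cons o rest ih =>
    intro i d s
    rw [bBuildPos, ih]
    by_cases hos : o = s
    · subst hos
      by_cases hc : d.contains o
      · have hsome : (d.get? o).isSome := by
          rw [← PySem.Dict.contains_eq_isSome_get?]; exact hc
        obtain ⟨v, hv⟩ := Option.isSome_iff_exists.mp hsome
        simp [hc, hv, PySem.List.index?_eq_idxOf?, List.idxOf?_cons]
      · have hnone : d.get? o = none := by
          cases h : d.get? o with
          | none => rfl
          | some v => rw [PySem.Dict.contains_eq_isSome_get?, h] at hc; simp at hc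
        simp [hc, hnone, PySem.List.index?_eq_idxOf?, List.idxOf?_cons]
    · have hd' : (if d.contains o then d else d.insert o i).get? s = d.get? s := by
        split
        · rfl
        · rw [PySem.Dict.get?_insert, if_neg (fun h => hos h.symm)]
      rw [hd']
      cases d.get? s with
      | some v => simp
      | none =>
        simp [PySem.List.index?_eq_idxOf?, List.idxOf?_cons, hos, Option.map_map]
        cases List.idxOf? s rest with
        | none => rfl
        | some k => simp; omega

-- a dot at position i makes take i a matching owner-candidate
theorem pred_of_dot (pattern : String) (i : Nat) (h : pattern.toList[i]? = some '.') :
    aPred pattern (String.ofList (pattern.toList.take i)) = true := by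
  rw [aPred_iff, String.toList_ofList]
  have h1 : pattern.toList.take i ++ ['.'] = pattern.toList.take (i + 1) := by
    rw [List.take_add_one, h]; rfl
  rw [h1]
  exact List.take_prefix _ _

-- bBestLoop: if no dot position has a hit, the fold stays none
theorem bBestLoop_none (cs : List Char) (pos : PySem.Dict String Nat)
    (hg : ∀ i : Nat, cs[i]? = some '.' → pos.get? (String.ofList (cs.take i)) = none) :
    ∀ (rest : List Char) (i : Nat), rest = cs.drop i →
      bBestLoop cs pos rest i none = none := by
  intro rest
  induction rest with
  | nil => intro i _; rfl
  | cons ch rest' ih =>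
    intro i hrest
    have hch : cs[i]? = some ch := by
      have h0 : (cs.drop i)[0]? = some ch := by rw [← hrest]; rfl
      rw [List.getElem?_drop] at h0; simpa using h0
    have hrest' : rest' = cs.drop (i + 1) := by
      have h1 : (cs.drop i).drop 1 = rest' := by rw [← hrest]; rfl
      rw [List.drop_drop] at h1; simpa [Nat.add_comm] using h1.symm
    rw [bBestLoop]
    by_cases hdot : ch = '.'
    · subst hdot
      simp only [hg i hch]
      exact ih (i + 1) hrest'
    · simp only [if_neg hdot]
      exact ih (i + 1) hrest' 

-- bBestLoop: once the global minimiser is the accumulator, it stays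
theorem bBestLoop_keep (cs : List Char) (pos : PySem.Dict String Nat) (j₀ i₀ : Nat)
    (H2 : ∀ i j : Nat, cs[i]? = some '.' → pos.get? (String.ofList (cs.take i)) = some j →
          j₀ < j ∨ (j = j₀ ∧ i = i₀)) :
    ∀ (rest : List Char) (i : Nat), rest = cs.drop i →
      bBestLoop cs pos rest i (some (j₀, i₀)) = some (j₀, i₀) := by
  intro rest
  induction rest with
  | nil => intro i _; rfl
  | cons ch rest' ih =>
    intro i hrest
    have hch : cs[i]? = some ch := by
      have h0 : (cs.drop i)[0]? = some ch := by rw [← hrest]; rfl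
      rw [List.getElem?_drop] at h0; simpa using h0
    have hrest' : rest' = cs.drop (i + 1) := by
      have h1 : (cs.drop i).drop 1 = rest' := by rw [← hrest]; rfl
      rw [List.drop_drop] at h1; simpa [Nat.add_comm] using h1.symm
    rw [bBestLoop]
    by_cases hdot : ch = '.'
    · subst hdot
      cases hg : pos.get? (String.ofList (cs.take i)) with
      | none => exact ih (i + 1) hrest'
      | some j =>
        have : ¬ j < j₀ := by
          rcases H2 i j hch hg with h | ⟨h, _⟩ <;> omega
        simp only [if_neg this]
        exact ih (i + 1) hrest'
    · simp only [if_neg hdot]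
      exact ih (i + 1) hrest' 

-- bBestLoop: the global minimiser is reached
theorem bBestLoop_reach (cs : List Char) (pos : PySem.Dict String Nat) (j₀ i₀ : Nat)
    (hi₀ : i₀ < cs.length)
    (H1 : cs[i₀]? = some '.' ∧ pos.get? (String.ofList (cs.take i₀)) = some j₀)
    (H2 : ∀ i j : Nat, cs[i]? = some '.' → pos.get? (String.ofList (cs.take i)) = some j →
          j₀ < j ∨ (j = j₀ ∧ i = i₀)) :
    ∀ (rest : List Char) (i : Nat) (best : Option (Nat × Nat)), rest = cs.drop i → i ≤ i₀ →
      (best = none ∨ ∃ j' i', best = some (j', i') ∧ j₀ < j') →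
      bBestLoop cs pos rest i best = some (j₀, i₀) := by
  intro rest
  induction rest with
  | nil =>
    intro i best hrest hle _
    exfalso
    have : cs.length ≤ i := by
      have := congrArg List.length hrest
      simp [List.length_drop] at this
      omega
    omega
  | cons ch rest' ih =>
    intro i best hrest hle hbest
    have hch : cs[i]? = some ch := by
      have h0 : (cs.drop i)[0]? = some ch := by rw [← hrest]; rfl
      rw [List.getElem?_drop] at h0; simpa using h0
    have hrest' : rest' = cs.drop (i + 1) := by
      have h1 : (cs.drop i).drop 1 = rest' := by rw [← hrest]; rfl
      rw [List.drop_drop] at h1; simpa [Nat.add_comm] using h1.symm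
    rw [bBestLoop]
    by_cases hii : i = i₀
    · subst hii
      have hdot : ch = '.' := by
        have := H1.1; rw [hch] at this; exact Option.some_inj.mp this
      subst hdot
      simp only [H1.2]
      rcases hbest with h | ⟨j', i', h, hlt⟩ <;> subst h
      · exact bBestLoop_keep cs pos j₀ i H2 rest' (i + 1) hrest'
      · simp only [if_pos hlt]
        exact bBestLoop_keep cs pos j₀ i H2 rest' (i + 1) hrest'
    · have hlt₀ : i < i₀ := by omega
      by_cases hdot : ch = '.'
      · subst hdot
        cases hg : pos.get? (String.ofList (cs.take i)) with
        | none => exact ih (i + 1) best hrest' (by omega) hbest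
        | some j =>
          have hj : j₀ < j := by
            rcases H2 i j hch hg with h | ⟨_, h⟩
            · exact h
            · exact absurd h hii
          rcases hbest with h | ⟨j', i', h, hlt⟩ <;> subst h
          · exact ih (i + 1) _ hrest' (by omega) (Or.inr ⟨j, i, rfl, hj⟩)
          · by_cases hjj : j < j'
            · simp only [if_pos hjj]
              exact ih (i + 1) _ hrest' (by omega) (Or.inr ⟨j, i, rfl, hj⟩)
            · simp only [if_neg hjj]
              exact ih (i + 1) _ hrest' (by omega) (Or.inr ⟨j', i', rfl, hlt⟩)
      · simp only [if_neg hdot]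
        exact ih (i + 1) best hrest' (by omega) hbest

-- A's loop skips the non-matching front of the list
theorem aFindOwner_append (pattern : String) (as bs : List String)
    (h : ∀ a ∈ as, aPred pattern a = false) :
    aFindOwner pattern (as ++ bs) = aFindOwner pattern bs := by
  induction as with
  | nil => rfl
  | cons a as' ih =>
    have ha : PySem.Str.startswith pattern (a ++ ".") = false := h a (by simp)
    rw [List.cons_append, aFindOwner]
    simp only [ha, Bool.false_eq_true, if_false]
    exact ih (fun a ha' => h a (by simp [ha']))

-- the central equivalence of the two loops
theorem loops_agree (pattern : String) (l : List String) :
    aFindOwner pattern l =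
      (match bBestLoop pattern.toList (bBuildPos l 0 PySem.Dict.empty) pattern.toList 0 none with
       | none => (none, pattern, false)
       | some b =>
          let suffix := String.ofList (pattern.toList.drop (b.2 + 1))
          (some (String.ofList (pattern.toList.take b.2)), if suffix = "" then "*" else suffix, true)) := by
  have hget : ∀ s : String, (bBuildPos l 0 PySem.Dict.empty).get? s = PySem.List.index? l s := by
    intro s
    rw [bBuildPos_get?]
    cases h : PySem.List.index? l s <;> simp [PySem.Dict.get?_empty, Option.orElse]
  cases hf : l.find? (aPred pattern) with
  | none =>
    have hall : ∀ o ∈ l, aPred pattern o = false := by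
      intro o ho
      have := List.find?_eq_none.mp hf o ho
      simpa using this
    have hA : aFindOwner pattern l = (none, pattern, false) := by
      have h1 := aFindOwner_append pattern l [] hall
      rw [List.append_nil] at h1
      rw [h1]; rfl
    have hB : bBestLoop pattern.toList (bBuildPos l 0 PySem.Dict.empty) pattern.toList 0 none = none := by
      apply bBestLoop_none
      · intro i hdot
        cases hgv : (bBuildPos l 0 PySem.Dict.empty).get? (String.ofList (pattern.toList.take i)) with
        | none => rfl
        | some j =>
          exfalso
          rw [hget] at hgv
          have hmem : String.ofList (pattern.toList.take i) ∈ l := by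
            rw [← PySem.List.index?_isSome_iff l _, hgv]; rfl
          have hfalse := hall _ hmem
          rw [pred_of_dot pattern i hdot] at hfalse
          cases hfalse
      · exact List.drop_zero.symm
    rw [hA, hB]
  | some o =>
    rw [List.find?_eq_some_iff_append] at hf
    obtain ⟨hpred, as, bs, hl, hfront⟩ := hf
    have hfront' : ∀ a ∈ as, aPred pattern a = false := by
      intro a ha
      have := hfront a ha
      simpa using this
    obtain ⟨t, ht⟩ : ∃ t, o.toList ++ '.' :: t = pattern.toList := by
      obtain ⟨t, ht⟩ := (aPred_iff pattern o).mp hpred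
      exact ⟨t, by simpa using ht⟩
    have f3 : o.toList.length < pattern.toList.length := by
      rw [← ht]; simp
    have f1 : pattern.toList.take o.toList.length = o.toList := by
      rw [← ht]
      exact List.take_left
    have f2 : pattern.toList[o.toList.length]? = some '.' := by
      rw [← ht]; simp
    have hoin : String.ofList (pattern.toList.take o.toList.length) = o := by
      rw [f1, String.ofList_toList]
    have honotin : o ∉ as := by
      intro hmem
      have := hfront' o hmem
      rw [hpred] at this
      cases this
    have hj₀ : PySem.List.index? l o = some as.length :=
      (PySem.List.index?_eq_some_iff l o as.length).mpr ⟨as, bs, hl, rfl, honotin⟩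
    have key : ∀ i j : Nat, pattern.toList[i]? = some '.' →
        (bBuildPos l 0 PySem.Dict.empty).get? (String.ofList (pattern.toList.take i)) = some j →
        as.length < j ∨ (j = as.length ∧ i = o.toList.length) := by
      intro i j hdot hg
      rw [hget] at hg
      obtain ⟨pre, suf, hl2, hlen, hnot⟩ := (PySem.List.index?_eq_some_iff l _ j).mp hg
      have hpredi : aPred pattern (String.ofList (pattern.toList.take i)) = true :=
        pred_of_dot pattern i hdot
      have hlj : l[j]? = some (String.ofList (pattern.toList.take i)) := by
        rw [hl2, ← hlen]; simp
      rcases Nat.lt_trichotomy j as.length with hc | hc | hc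
      · exfalso
        have hja : l[j]? = as[j]? := by
          rw [hl]; exact List.getElem?_append_left hc
        rw [hja] at hlj
        have hmem := List.mem_of_getElem? hlj
        have := hfront' _ hmem
        rw [hpredi] at this
        cases this
      · right
        refine ⟨hc, ?_⟩
        have hlj₀ : l[as.length]? = some o := by rw [hl]; simp
        rw [hc, hlj₀] at hlj
        have hveq : o = String.ofList (pattern.toList.take i) := Option.some_inj.mp hlj
        have hilen : i < pattern.toList.length := (List.getElem?_eq_some_iff.mp hdot).1
        have htake : pattern.toList.take i = o.toList := by
          rw [hveq]; simp
        have := congrArg List.length htake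
        rw [List.length_take] at this
        omega
      · left; exact hc
    have hBB : bBestLoop pattern.toList (bBuildPos l 0 PySem.Dict.empty) pattern.toList 0 none
        = some (as.length, o.toList.length) :=
      bBestLoop_reach _ _ as.length o.toList.length f3 ⟨f2, by rw [hget, hoin]; exact hj₀⟩ key
        pattern.toList 0 none List.drop_zero.symm (Nat.zero_le _) (Or.inl rfl)
    have hA : aFindOwner pattern l = aFindOwner pattern (o :: bs) := by
      rw [hl]; exact aFindOwner_append pattern as _ hfront'
    have hpred' : PySem.Str.startswith pattern (o ++ ".") = true := hpred
    rw [hA, hBB, aFindOwner]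
    simp only [hpred', if_true]
    have hsuf : PySem.Str.slice pattern (some (PySem.Str.len (o ++ "."))) none
        = String.ofList (pattern.toList.drop (o.toList.length + 1)) := by
      apply String.toList_inj.mp
      rw [String.toList_ofList, PySem.Str.toList_slice, PySem.Chars.slice_eq_listSlice]
      have hlen1 : PySem.Str.len (o ++ ".") = ((o.toList.length + 1 : Nat) : Int) := by
        simp [PySem.Str.len, String.toList_append]
      rw [hlen1, PySem.List.slice_from_natCast]
    rw [hsuf, hoin]

-- ===== VERDICT (by name: the statement is the Claim_ definition above) =====
theorem split_namespaced_pattern_with_sorted_owners_py_spec : Claim_equal_split_namespaced_pattern_with_sorted_owners_py := by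
  intro pattern owner_names sorted_owners _
  unfold Spec_split_namespaced_pattern_with_sorted_owners_py
  unfold split_namespaced_pattern_with_sorted_owners_py split_namespaced_pattern_with_sorted_owners_py_alt
  split_ifs with h1 h2
  · rfl
  · rfl
  · exact loops_agree pattern sorted_owners
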